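-- pv_equiv track=rewrite | github.com/tom-miller1/aoc-2024 | python/test_day05.py | order_pages
-- ===== SOURCE A (Python) =====
-- from collections import defaultdict
--
-- def order_pages(rules: list[tuple[str, str]]) -> list[str]:
--     rule_dict: defaultdict[str] = defaultdict(list)
--     for rule in rules:
--         rule_dict[rule[0]].append(rule[1])
--     for page in rule_dict.values():
--         if len(page) == 1:
--             last_page = page[0]
--
--     return (*sorted(rule_dict, key=lambda key: len(rule_dict[key]), reverse=True), last_page)
-- ===== SOURCE B (Python) =====
-- def order_pages(rules: list[tuple[str, str]]) -> list[str]: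
--     # One counting pass + bucket sort by out-degree (no comparison sort).
--     counts = {}
--     succ = {}
--     for a, b in rules:
--         counts[a] = counts.get(a, 0) + 1
--         succ[a] = b
--     last_page = None
--     found = False
--     for k, c in counts.items():
--         if c == 1:
--             last_page = succ[k]
--             found = True
--     if not found:
--         raise ValueError("no page with a single successor")
--     m = max(counts.values())
--     buckets = [[] for _ in range(m + 1)]
--     for k, c in counts.items():
--         buckets[c].append(k)
--     out = []
--     for c in range(m, 0, -1):
--         out.extend(buckets[c])
--     out.append(last_page)
--     return tuple(out)
-- ===== Notes on version B (the rewrite author's own statement) =====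
-- stated objective: alternative
-- what changed: Replaces the defaultdict-of-successor-lists plus comparison sort (sorted with key=len, reverse=True) by a single counting pass (count and last successor per key) followed by a bucket/counting sort over out-degrees, concatenating buckets from the maximum degree down; identical stable descending order and terminal page.
import Mathlib
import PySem

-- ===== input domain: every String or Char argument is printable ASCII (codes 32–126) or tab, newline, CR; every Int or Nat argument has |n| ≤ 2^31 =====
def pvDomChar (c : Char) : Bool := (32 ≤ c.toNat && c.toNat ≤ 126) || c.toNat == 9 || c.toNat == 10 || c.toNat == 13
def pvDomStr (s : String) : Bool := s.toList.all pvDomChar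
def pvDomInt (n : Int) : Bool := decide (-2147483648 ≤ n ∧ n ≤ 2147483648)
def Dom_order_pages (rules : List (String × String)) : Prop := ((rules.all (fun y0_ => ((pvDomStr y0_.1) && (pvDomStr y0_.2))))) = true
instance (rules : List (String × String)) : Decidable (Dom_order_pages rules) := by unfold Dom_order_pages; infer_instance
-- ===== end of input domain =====

-- B replaces the successor-list dict + comparison sort by one counting pass and a bucket sort over out-degrees (objective: alternative).

-- ===== PORT A =====
-- A-side helpers: the defaultdict(list) build and the last_page scan over its values
def pvA_dict (rules : List (String × String)) : PySem.Dict String (List String) :=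
  rules.foldl (fun d rule => d.modify rule.1 [] (fun x => x ++ [rule.2])) PySem.Dict.empty

-- page[0] under the guard 'len(page) == 1' is the head of the (nonempty) list
def pvA_last (rules : List (String × String)) : Option String :=
  (pvA_dict rules).values.foldl (fun lp page => if page.length == 1 then some page.headI else lp) none

def order_pages (rules : List (String × String)) : List String :=
  match pvA_last rules with
  | some l => PySem.List.sorted (pvA_dict rules).keys
      (fun key => (((pvA_dict rules).getD key []).length : Int)) true ++ [l]
  | none => []  -- Python raises NameError here ('last_page' unbound); excluded by Pre_

-- ===== PORT B =====
-- B-side helpers: the single counting pass (counts, succ), the last_page scan, and the bucket sort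
def pvB_st (rules : List (String × String)) : PySem.Dict String Int × PySem.Dict String String :=
  rules.foldl (fun p r => (p.1.insert r.1 (p.1.getD r.1 0 + 1), p.2.insert r.1 r.2))
    (PySem.Dict.empty, PySem.Dict.empty)

def pvB_last (rules : List (String × String)) : Option String :=
  (pvB_st rules).1.items.foldl (fun lp kc => if kc.2 == 1 then (pvB_st rules).2.get? kc.1 else lp) none

-- the bucket sort of Source B, run once last_page is known and counts.values = v :: vs is nonempty
def pvB_buckets0 (m : Int) : List (List String) :=
  (PySem.List.pyRange 0 (m + 1) 1).map (fun _ => ([] : List String))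

def pvB_buckets (counts : PySem.Dict String Int) (m : Int) : List (List String) :=
  counts.items.foldl
    (fun b kc => PySem.List.pySetD b kc.2 (PySem.List.pyGetD b kc.2 [] ++ [kc.1])) (pvB_buckets0 m)

def pvB_out (counts : PySem.Dict String Int) (m : Int) : List String :=
  (PySem.List.pyRange m 0 (-1)).foldl (fun acc c => acc ++ PySem.List.pyGetD (pvB_buckets counts m) c []) []

def pvB_tail (counts : PySem.Dict String Int) (last : String) (v : Int) (vs : List Int) : List String :=
  pvB_out counts (vs.foldl max v) ++ [last]

def order_pages_alt (rules : List (String × String)) : List String :=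
  match pvB_last rules with
  | none => []  -- Source B raises ValueError here; excluded by Pre_
  | some last =>
    match (pvB_st rules).1.values with
    | [] => []  -- unreachable: a found last_page implies counts is nonempty (max() of a nonempty list)
    | v :: vs => pvB_tail (pvB_st rules).1 last v vs

-- ===== PRECONDITION & SPEC =====
-- Pre_ excludes exactly the inputs on which Python A raises NameError (no first element occurs exactly
-- once among the rules, so 'last_page' is never assigned); Source B raises ValueError there too.
def Pre_order_pages (rules : List (String × String)) : Prop :=
  (rules.any (fun r => (rules.map (fun p => p.1)).count r.1 == 1)) = true
instance (rules : List (String × String)) : Decidable (Pre_order_pages rules) := by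
  unfold Pre_order_pages; infer_instance
def pvWitness_order_pages : (List (String × String)) := [("1", "2"), ("2", "3"), ("1", "3")]
def Spec_order_pages (rules : List (String × String)) (out : List String) : Prop := out = order_pages_alt rules
instance (rules : List (String × String)) (out : List String) : Decidable (Spec_order_pages rules out) := by
  unfold Spec_order_pages; infer_instance

-- ===== CLAIM (what is proved, stated in full; the proofs are below) =====
def Claim_equal_order_pages : Prop := ∀ (rules : List (String × String)), Dom_order_pages rules → Pre_order_pages rules → Spec_order_pages rules (order_pages rules)

-- ===== LEMMAS AND PROOFS =====

-- shared abbreviations: the key list, the out-degree, the successor group of a key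
def pvK (rules : List (String × String)) : List String := PySem.Set.ofList (rules.map (fun p => p.1))
def pvCnt (rules : List (String × String)) (k : String) : Int := ((rules.map (fun p => p.1)).count k : Int)
def pvGrp (rules : List (String × String)) (k : String) : List String :=
  (rules.filter (fun p => p.1 == k)).map (fun p => p.2)

-- a foldl producing a pair with independent components splits
theorem pv_foldl_pair_split {α β γ : Type} (l : List α) (F : β → α → β) (G : γ → α → γ) (b : β) (c : γ) :
    l.foldl (fun (p : β × γ) r => (F p.1 r, G p.2 r)) (b, c) = (l.foldl F b, l.foldl G c) := by
  induction l generalizing b c with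
  | nil => rfl
  | cons r rs ih => simpa using ih (F b r) (G c r)

theorem pvB_st_eq (rules : List (String × String)) :
    pvB_st rules = (rules.foldl (fun d r => d.insert r.1 (d.getD r.1 0 + 1)) PySem.Dict.empty,
                    rules.foldl (fun d r => d.insert r.1 r.2) PySem.Dict.empty) := by
  unfold pvB_st
  exact pv_foldl_pair_split rules
    (fun (d : PySem.Dict String Int) (r : String × String) => d.insert r.1 (d.getD r.1 0 + 1))
    (fun (d : PySem.Dict String String) (r : String × String) => d.insert r.1 r.2)
    PySem.Dict.empty PySem.Dict.empty

-- last-value lookup of an insert fold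
theorem pv_get?_foldl_insert (l : List (String × String)) (d : PySem.Dict String String) (k : String) :
    (l.foldl (fun d r => d.insert r.1 r.2) d).get? k
      = ((l.filter (fun p => p.1 == k)).map (fun p => p.2)).getLast?.or (d.get? k) := by
  induction l generalizing d with
  | nil => simp
  | cons r rs ih =>
    by_cases h : r.1 = k
    · simp only [List.foldl_cons, ih, List.filter_cons, h, beq_self_eq_true, if_pos, List.map_cons]
      rw [List.getLast?_cons, PySem.Dict.get?_insert]
      cases hl : ((rs.filter (fun p => p.1 == k)).map (fun p => p.2)).getLast? with
      | none => simp
      | some w => simp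
    · have hb : (r.1 == k) = false := by simp [h]
      simp only [List.foldl_cons, ih, List.filter_cons, hb]
      rw [PySem.Dict.get?_insert]
      have h' : ¬ k = r.1 := fun hk => h hk.symm
      simp [h']

theorem pv_succ_single (rules : List (String × String)) (k w : String) (h : pvGrp rules k = [w]) :
    (pvB_st rules).2.get? k = some w := by
  rw [pvB_st_eq]
  unfold pvGrp at h
  simp only [pv_get?_foldl_insert, h, PySem.Dict.get?_empty]
  simp

-- rule_dict's group list
theorem pvA_getD (rules : List (String × String)) (k : String) :
    (pvA_dict rules).getD k [] = pvGrp rules k := by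
  unfold pvA_dict
  have := PySem.Dict.getD_foldl_modify_append rules (PySem.Dict.empty : PySem.Dict String (List String)) k
  simpa [pvGrp] using this

-- counts as a count
theorem pv_counts_getD (rules : List (String × String)) (k : String) :
    (pvB_st rules).1.getD k 0 = pvCnt rules k := by
  rw [pvB_st_eq]
  have h1 : rules.foldl (fun d r => d.insert r.1 (d.getD r.1 0 + 1))
      (PySem.Dict.empty : PySem.Dict String Int)
      = (rules.map (fun p => p.1)).foldl (fun d x => d.insert x (d.getD x 0 + 1)) PySem.Dict.empty := by
    rw [List.foldl_map]
  simp only [h1]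
  rw [PySem.Dict.getD_foldl_insert_add_one]
  simp [pvCnt]

-- the length of the group list is the out-degree
theorem pv_grp_length (rules : List (String × String)) (k : String) :
    ((pvGrp rules k).length : Int) = pvCnt rules k := by
  simp only [pvGrp, pvCnt, List.length_map, List.count_eq_countP, List.countP_map]
  norm_cast
  rw [List.countP_eq_length_filter]
  have hfc : List.filter ((fun x => x == k) ∘ fun p => (p : String × String).1) rules
      = List.filter (fun p => p.1 == k) rules := by
    apply List.filter_congr
    intro a _
    simp [Function.comp]
  rw [hfc]

-- keys of both dicts are the distinct first elements, in first-seen order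
theorem pvA_keys (rules : List (String × String)) : (pvA_dict rules).keys = pvK rules := by
  unfold pvA_dict pvK
  rw [PySem.Dict.keys_foldl_modify_key rules (fun rule => rule.1) [] (fun d rule x => x ++ [rule.2])
    PySem.Dict.empty, PySem.Dict.keys_empty, PySem.Set.ofList_eq_foldl]
  rfl

theorem pvB_keys (rules : List (String × String)) : (pvB_st rules).1.keys = pvK rules := by
  rw [pvB_st_eq]
  unfold pvK
  rw [PySem.Dict.keys_foldl_insert_key rules (fun r => r.1) (fun d r => d.getD r.1 0 + 1)
    PySem.Dict.empty, PySem.Dict.keys_empty, PySem.Set.ofList_eq_foldl]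
  rfl

theorem pvK_nodup (rules : List (String × String)) : (pvK rules).Nodup :=
  PySem.Set.nodup_ofList _

theorem pvA_keys_nodup (rules : List (String × String)) : (pvA_dict rules).keys.Nodup := by
  rw [pvA_keys]; exact pvK_nodup rules

theorem pvB_keys_nodup (rules : List (String × String)) : (pvB_st rules).1.keys.Nodup := by
  rw [pvB_keys]; exact pvK_nodup rules

-- both last_page scans agree
theorem pv_last_eq (rules : List (String × String)) : pvA_last rules = pvB_last rules := by
  unfold pvA_last pvB_last
  rw [PySem.Dict.values_eq_map_keys _ (pvA_keys_nodup rules) ([] : List String),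
      PySem.Dict.items_eq_map_keys _ (pvB_keys_nodup rules) (0 : Int),
      List.foldl_map, List.foldl_map, pvA_keys, pvB_keys]
  apply PySem.List.foldl_congr_mem
  intro acc k hk
  rw [pvA_getD, pv_counts_getD]
  by_cases hc : (pvGrp rules k).length = 1
  · obtain ⟨w, hw⟩ := List.length_eq_one_iff.mp hc
    have h2 : pvCnt rules k = 1 := by rw [← pv_grp_length, hc]; rfl
    rw [hw]
    simp [h2, pv_succ_single rules k w hw]
  · have h2 : ¬ pvCnt rules k = 1 := by
      rw [← pv_grp_length]
      exact_mod_cast hc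
    simp [hc, h2]

-- ∀ x ≤ foldl max
theorem pv_le_foldl_max (l : List Int) (a : Int) :
    a ≤ l.foldl max a ∧ ∀ x ∈ l, x ≤ l.foldl max a := by
  induction l generalizing a with
  | nil => simp
  | cons y ys ih =>
    rw [List.foldl_cons]
    refine ⟨le_trans (le_max_left a y) (ih (max a y)).1, ?_⟩
    intro x hx
    rcases List.mem_cons.mp hx with h | h
    · rw [h]
      exact le_trans (le_max_right a y) (ih (max a y)).1
    · exact (ih (max a y)).2 x h

theorem pv_foldl_max_bound (v : Int) (vs : List Int) : ∀ x ∈ v :: vs, x ≤ vs.foldl max v := by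
  intro x hx
  rcases List.mem_cons.mp hx with h | h
  · rw [h]
    exact (pv_le_foldl_max vs v).1
  · exact (pv_le_foldl_max vs v).2 x h

-- insert x between a prefix of non-before's and a suffix of before's
theorem pv_insertBy_middle {α : Type} (p : α → α → Bool) (x : α) (l1 l2 : List α)
    (h1 : ∀ y ∈ l1, p x y = false) (h2 : ∀ y ∈ l2, p x y = true) :
    PySem.List.insertBy p x (l1 ++ l2) = l1 ++ x :: l2 := by
  induction l1 with
  | nil =>
    cases l2 with
    | nil => rfl
    | cons y ys => simp [PySem.List.insertBy, h2 y (by simp)]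
  | cons y ys ih =>
    have hy : p x y = false := h1 y (by simp)
    simp only [List.cons_append, PySem.List.insertBy, hy]
    simp only [Bool.false_eq_true, if_false, List.cons.injEq, true_and]
    exact ih (fun z hz => h1 z (by simp [hz]))

-- a flatMap whose functions agree on members
theorem pv_flatMap_congr {α β : Type} (l : List α) (f g : α → List β)
    (h : ∀ x ∈ l, f x = g x) : l.flatMap f = l.flatMap g := by
  induction l with
  | nil => rfl
  | cons y ys ih =>
    simp only [List.flatMap_cons, h y (by simp), ih (fun z hz => h z (by simp [hz]))]

-- the master lemma: a stable descending sort by an Int key IS the bucket concatenation, max degree down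
theorem pv_sorted_rev_eq_buckets {α : Type} (f : α → Int) (m : Int) (xs : List α)
    (h : ∀ x ∈ xs, 1 ≤ f x ∧ f x ≤ m) :
    PySem.List.sorted xs f true
      = (PySem.List.pyRange m 0 (-1)).flatMap (fun c => xs.filter (fun x => f x == c)) := by
  induction xs using List.reverseRecOn with
  | nil =>
    have hz : ∀ l : List Int, l.flatMap (fun c => ([] : List α).filter (fun x => f x == c)) = [] := by
      intro l
      induction l with
      | nil => rfl
      | cons a as iha => simpa using iha
    rw [hz]
    rfl
  | append_singleton xs x ih =>
    have hx1 : 1 ≤ f x := (h x (by simp)).1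
    have hx2 : f x ≤ m := (h x (by simp)).2
    have hxs : ∀ y ∈ xs, 1 ≤ f y ∧ f y ≤ m := fun y hy => h y (by simp [hy])
    rw [PySem.List.sorted_rev_eq_foldl_insertBy, List.foldl_append, List.foldl_cons, List.foldl_nil,
      ← PySem.List.sorted_rev_eq_foldl_insertBy, ih hxs]
    have h01 : (0 : Int) + 1 = 1 := by norm_num
    have hsplit : PySem.List.pyRange m 0 (-1)
        = (PySem.List.pyRange (f x + 1) (m + 1)).reverse ++ [f x]
            ++ (PySem.List.pyRange 1 (f x)).reverse := by
      rw [PySem.List.pyRange_neg_one_eq_reverse, h01,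
        PySem.List.pyRange_one_append 1 (f x) (m + 1) hx1 (by omega),
        PySem.List.pyRange_one_cons (by omega : f x < m + 1)]
      simp
    rw [hsplit]
    simp only [List.flatMap_append, List.flatMap_cons, List.flatMap_nil, List.append_nil]
    -- the three pieces of the new bucket list
    have hhi : ((PySem.List.pyRange (f x + 1) (m + 1)).reverse).flatMap
          (fun c => (xs ++ [x]).filter (fun y => f y == c))
        = ((PySem.List.pyRange (f x + 1) (m + 1)).reverse).flatMap
          (fun c => xs.filter (fun y => f y == c)) := by
      apply pv_flatMap_congr
      intro c hc
      rw [List.mem_reverse, PySem.List.mem_pyRange_one] at hc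
      have hne : (f x == c) = false := by simp; omega
      simp [List.filter_append, hne]
    have hlo : ((PySem.List.pyRange 1 (f x)).reverse).flatMap
          (fun c => (xs ++ [x]).filter (fun y => f y == c))
        = ((PySem.List.pyRange 1 (f x)).reverse).flatMap
          (fun c => xs.filter (fun y => f y == c)) := by
      apply pv_flatMap_congr
      intro c hc
      rw [List.mem_reverse, PySem.List.mem_pyRange_one] at hc
      have hne : (f x == c) = false := by simp; omega
      simp [List.filter_append, hne]
    have hmid : (xs ++ [x]).filter (fun y => f y == f x)
        = xs.filter (fun y => f y == f x) ++ [x] := by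
      simp [List.filter_append]
    rw [hhi, hlo, hmid]
    -- insert x after the ≥-f x buckets and before the <-f x buckets
    have h1 : ∀ y ∈ ((PySem.List.pyRange (f x + 1) (m + 1)).reverse).flatMap
          (fun c => xs.filter (fun y => f y == c)) ++ xs.filter (fun y => f y == f x),
        (fun a b => decide (f b < f a)) x y = false := by
      intro y hy
      rcases List.mem_append.mp hy with hy | hy
      · obtain ⟨c, hc, hyc⟩ := List.mem_flatMap.mp hy
        rw [List.mem_reverse, PySem.List.mem_pyRange_one] at hc
        have : f y = c := by have := (List.mem_filter.mp hyc).2; simpa using this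
        simp only [decide_eq_false_iff_not]
        omega
      · have : f y = f x := by have := (List.mem_filter.mp hy).2; simpa using this
        simp only [decide_eq_false_iff_not]
        omega
    have h2 : ∀ y ∈ ((PySem.List.pyRange 1 (f x)).reverse).flatMap
          (fun c => xs.filter (fun y => f y == c)),
        (fun a b => decide (f b < f a)) x y = true := by
      intro y hy
      obtain ⟨c, hc, hyc⟩ := List.mem_flatMap.mp hy
      rw [List.mem_reverse, PySem.List.mem_pyRange_one] at hc
      have : f y = c := by have := (List.mem_filter.mp hyc).2; simpa using this
      simp only [decide_eq_true_eq]
      omega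
    have := pv_insertBy_middle (fun a b => decide (f b < f a)) x
      (((PySem.List.pyRange (f x + 1) (m + 1)).reverse).flatMap
          (fun c => xs.filter (fun y => f y == c)) ++ xs.filter (fun y => f y == f x))
      (((PySem.List.pyRange 1 (f x)).reverse).flatMap
          (fun c => xs.filter (fun y => f y == c))) h1 h2
    simp only [← List.append_assoc] at this ⊢
    rw [this]
    simp [List.append_assoc]

-- the bucket-building fold, elementwise
theorem pv_bucket_fold (pairs : List (String × Int)) (bl : List (List String))
    (h : ∀ p ∈ pairs, 0 ≤ p.2 ∧ p.2 < (bl.length : Int)) (j : Nat) (hj : j < bl.length) :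
    (pairs.foldl (fun b kc => PySem.List.pySetD b kc.2 (PySem.List.pyGetD b kc.2 [] ++ [kc.1])) bl)[j]?
      = some (bl[j] ++ (pairs.filter (fun p => p.2 == (j : Int))).map (fun p => p.1)) := by
  induction pairs generalizing bl with
  | nil => simp [List.getElem?_eq_getElem hj]
  | cons p ps ih =>
    obtain ⟨hp0, hpl⟩ := h p (by simp)
    obtain ⟨n, hn⟩ : ∃ n : Nat, p.2 = (n : Int) := ⟨p.2.toNat, (Int.toNat_of_nonneg hp0).symm⟩
    have hnlt : n < bl.length := by omega
    have hget : PySem.List.pyGetD bl p.2 [] = bl[n] := by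
      rw [hn, PySem.List.pyGetD, PySem.List.pyGet?_natCast, List.getElem?_eq_getElem hnlt]
      rfl
    have hset : PySem.List.pySetD bl p.2 (PySem.List.pyGetD bl p.2 [] ++ [p.1])
        = bl.set n (bl[n] ++ [p.1]) := by
      rw [hget, hn, PySem.List.pySetD, PySem.List.pySet?_natCast _ _ _ hnlt]
      rfl
    have hlen : (bl.set n (bl[n] ++ [p.1])).length = bl.length := List.length_set
    rw [List.foldl_cons, hset, ih (bl.set n (bl[n] ++ [p.1]))
      (fun q hq => by simpa [hlen] using h q (by simp [hq])) (by simpa [hlen] using hj)]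
    by_cases hjn : n = j
    · have hbeq : (p.2 == (j : Int)) = true := by rw [hn, hjn]; simp
      simp [hbeq, hjn]
    · have hbeq : (p.2 == (j : Int)) = false := by
        rw [hn]
        simp only [beq_eq_false_iff_ne, ne_eq, Nat.cast_inj]
        exact hjn
      simp [hbeq, hjn]

-- the central equality of the two ports
theorem pv_main (rules : List (String × String)) : order_pages rules = order_pages_alt rules := by
  unfold order_pages order_pages_alt
  rw [← pv_last_eq rules]
  cases hL : pvA_last rules with
  | none => rfl
  | some l =>
    dsimp only
    have hrne : rules ≠ [] := by
      intro h0
      rw [h0] at hL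
      have hnil : pvA_last [] = none := rfl
      rw [hnil] at hL
      simp at hL
    obtain ⟨r0, rs0, hr⟩ := List.exists_cons_of_ne_nil hrne
    have hKmem : r0.1 ∈ pvK rules := by
      unfold pvK
      rw [PySem.Set.mem_ofList, hr]
      simp
    have hVal : (pvB_st rules).1.values = (pvK rules).map (fun k => pvCnt rules k) := by
      rw [PySem.Dict.values_eq_map_keys _ (pvB_keys_nodup rules) (0 : Int), pvB_keys]
      exact List.map_congr_left (fun k _ => pv_counts_getD rules k)
    cases hV : (pvB_st rules).1.values with
    | nil =>
      rw [hV] at hVal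
      have hK0 : pvK rules = [] := List.map_eq_nil_iff.mp hVal.symm
      rw [hK0] at hKmem
      simp at hKmem
    | cons v vs =>
      dsimp only
      unfold pvB_tail pvB_out pvB_buckets pvB_buckets0
      set m := vs.foldl max v with hm
      have hVmem : ∀ x ∈ (pvB_st rules).1.values, x ≤ m := by
        rw [hV]; exact pv_foldl_max_bound v vs
      have hcntmem : ∀ k ∈ pvK rules, (1 : Int) ≤ pvCnt rules k ∧ pvCnt rules k ≤ m := by
        intro k hk
        constructor
        · unfold pvCnt
          have hkm : k ∈ rules.map (fun p => p.1) := (PySem.Set.mem_ofList _ _).mp hk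
          have := List.count_pos_iff.mpr hkm
          omega
        · exact hVmem _ (hVal ▸ List.mem_map_of_mem hk)
      have hm1 : (1 : Int) ≤ m :=
        le_trans (hcntmem r0.1 hKmem).1 (hcntmem r0.1 hKmem).2
      -- the initial bucket list is a replicate of empties
      have hb0 : (PySem.List.pyRange 0 (m + 1) 1).map (fun _ => ([] : List String))
          = List.replicate (m + 1).toNat ([] : List String) := by
        rw [List.map_const', PySem.List.length_pyRange_one]
        norm_num
      have hlenb0 : (List.replicate (m + 1).toNat ([] : List String)).length = (m + 1).toNat :=
        List.length_replicate
      have hItems : (pvB_st rules).1.items = (pvK rules).map (fun k => (k, pvCnt rules k)) := by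
        rw [PySem.Dict.items_eq_map_keys _ (pvB_keys_nodup rules) (0 : Int), pvB_keys]
        exact List.map_congr_left (fun k _ => by rw [pv_counts_getD])
      have hInRange : ∀ q ∈ (pvB_st rules).1.items,
          0 ≤ q.2 ∧ q.2 < ((List.replicate (m + 1).toNat ([] : List String)).length : Int) := by
        intro q hq
        rw [hItems] at hq
        obtain ⟨k, hk, hkq⟩ := List.mem_map.mp hq
        obtain ⟨hk1, hk2⟩ := hcntmem k hk
        rw [hlenb0, ← hkq]
        dsimp only
        omega
      rw [hb0]
      -- the out list is the bucket concatenation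
      rw [PySem.List.foldl_append_eq_flatMap]
      have hout : (PySem.List.pyRange m 0 (-1)).flatMap (fun c =>
            PySem.List.pyGetD ((pvB_st rules).1.items.foldl
              (fun b kc => PySem.List.pySetD b kc.2 (PySem.List.pyGetD b kc.2 [] ++ [kc.1]))
              (List.replicate (m + 1).toNat ([] : List String))) c [])
          = (PySem.List.pyRange m 0 (-1)).flatMap (fun c =>
              (pvK rules).filter (fun k => pvCnt rules k == c)) := by
        apply pv_flatMap_congr
        intro c hc
        rw [PySem.List.mem_pyRange_neg_one] at hc
        have hc0 : 0 ≤ c := le_of_lt hc.1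
        have hccast : ((c.toNat : Nat) : Int) = c := Int.toNat_of_nonneg hc0
        have hjlt : c.toNat < (List.replicate (m + 1).toNat ([] : List String)).length := by
          rw [hlenb0]; omega
        rw [PySem.List.pyGetD, ← hccast, PySem.List.pyGet?_natCast,
          pv_bucket_fold _ _ hInRange c.toNat hjlt]
        rw [List.getElem_replicate, hItems]
        simp only [Option.getD_some, List.nil_append]
        rw [List.filter_map, List.map_map]
        simp [Function.comp_def]
      rw [hout]
      -- and the sorted keys are the same concatenation
      have hkeyfun : (fun key => (((pvA_dict rules).getD key []).length : Int))
          = fun k => pvCnt rules k := by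
        funext k
        rw [pvA_getD, pv_grp_length]
      rw [pvA_keys, hkeyfun, pv_sorted_rev_eq_buckets (fun k => pvCnt rules k) m (pvK rules) hcntmem]
      simp

-- ===== VERDICT (by name: the statement is the Claim_ definition above) =====
theorem order_pages_spec : Claim_equal_order_pages := by
  intro rules _ _
  unfold Spec_order_pages
  exact pv_main rules
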